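-- pv_equiv track=rewrite | github.com/yangzhang33/eval_benchmark | translate_cs.py | sanitize_json_quotes
-- ===== SOURCE A (Python) =====
-- def sanitize_json_quotes(json_str: str) -> str:
--     """Replace unescaped double quotes inside JSON string values with single quotes.
--
--     Uses a state machine: when inside a JSON string, a '"' is only treated as the
--     closing delimiter if the next non-whitespace character is ':', ',', '}', or ']'.
--     Any other '"' is an unescaped internal quote and gets replaced with "'".
--     """
--     result = []
--     i = 0
--     n = len(json_str)
--
--     while i < n:
--         c = json_str[i]
--         if c != '"':
--             result.append(c)
--             i += 1
--             continue
--
--         # Opening quote of a JSON string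
--         result.append(c)
--         i += 1
--         while i < n:
--             c = json_str[i]
--             if c == '\\':
--                 result.append(c)
--                 i += 1
--                 if i < n:
--                     result.append(json_str[i])
--                     i += 1
--             elif c == '"':
--                 # Look ahead past whitespace to decide if this closes the string
--                 j = i + 1
--                 while j < n and json_str[j] in ' \t\n\r':
--                     j += 1
--                 if j >= n or json_str[j] in ':,}]':
--                     result.append(c)
--                     i += 1
--                     break
--                 else:
--                     result.append("'")
--                     i += 1
--             elif c == '\n':
--                 result.append('\\n')
--                 i += 1
--             elif c == '\r':
--                 result.append('\\r')
--                 i += 1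
--             elif c == '\t':
--                 result.append('\\t')
--                 i += 1
--             else:
--                 result.append(c)
--                 i += 1
--
--     return ''.join(result)
-- ===== SOURCE B (Python) =====
-- def sanitize_json_quotes(json_str: str) -> str:
--     """One backward pass precomputes the next non-whitespace character after each
--     position; then a flat 3-state (outside / inside / just-after-backslash) fold
--     over the characters emits the output, instead of A's nested rescanning loops."""
--     n = len(json_str)
--     la = [None] * (n + 1)  # la[i] = first non-whitespace char at index >= i, or None
--     for i in range(n - 1, -1, -1):
--         la[i] = la[i + 1] if json_str[i] in ' \t\n\r' else json_str[i]
--     out = []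
--     state = 0  # 0 = outside string, 1 = inside string, 2 = right after a backslash
--     for i, c in enumerate(json_str):
--         if state == 2:
--             out.append(c)
--             state = 1
--         elif state == 0:
--             out.append(c)
--             if c == '"':
--                 state = 1
--         elif c == '\\':
--             out.append(c)
--             state = 2
--         elif c == '"':
--             nc = la[i + 1]
--             if nc is None or nc in ':,}]':
--                 out.append(c)
--                 state = 0
--             else:
--                 out.append("'")
--         elif c == '\n':
--             out.append('\\n')
--         elif c == '\r':
--             out.append('\\r')
--         elif c == '\t':
--             out.append('\\t')
--         else:
--             out.append(c)
--     return ''.join(out)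
-- ===== Notes on version B (the rewrite author's own statement) =====
-- stated objective: alternative
-- what changed: A backward pass precomputes the next non-whitespace lookahead for every position, and the nested while loops (with the escape pair consumed inline) become one flat fold over the characters driven by an explicit 3-state machine (outside/inside/after-backslash).
import Mathlib
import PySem

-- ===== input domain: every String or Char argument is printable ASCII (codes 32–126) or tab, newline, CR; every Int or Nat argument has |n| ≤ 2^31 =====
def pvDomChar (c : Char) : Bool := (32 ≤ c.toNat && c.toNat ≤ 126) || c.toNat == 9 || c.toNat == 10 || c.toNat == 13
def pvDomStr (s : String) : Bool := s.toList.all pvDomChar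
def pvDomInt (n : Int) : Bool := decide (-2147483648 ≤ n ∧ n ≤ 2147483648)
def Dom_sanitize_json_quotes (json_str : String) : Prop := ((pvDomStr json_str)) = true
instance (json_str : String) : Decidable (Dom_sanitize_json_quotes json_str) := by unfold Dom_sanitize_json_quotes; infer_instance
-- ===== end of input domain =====

-- B precomputes the next-non-whitespace lookahead in a backward pass and replaces A's
-- nested while loops by one flat fold with an explicit 3-state machine (objective: alternative).

-- ===== PORT A =====
-- shared character classes: `c in ' \t\n\r'` and `c in ':,}]'`
def pvIsWs (c : Char) : Bool := c = ' ' || c = '\t' || c = '\n' || c = '\r'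
def pvIsCloser (c : Char) : Bool := c = ':' || c = ',' || c = '}' || c = ']'

-- A's inner `while j < n and json_str[j] in ' \t\n\r'` lookahead: the char A inspects at j (none = j >= n)
def pvSkipWs : List Char → Option Char
  | [] => none
  | c :: r => if pvIsWs c then pvSkipWs r else some c

mutual
-- A's outer while loop (outside a JSON string)
def pvGoA : List Char → List Char
  | [] => []
  | c :: r => if c ≠ '"' then c :: pvGoA r else '"' :: pvGoAIn r
-- A's inner while loop (inside a JSON string)
def pvGoAIn : List Char → List Char
  | [] => []
  | c :: r =>
    if c = '\\' then
      match r with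
      | [] => ['\\']
      | d :: r' => '\\' :: d :: pvGoAIn r'
    else if c = '"' then
      match pvSkipWs r with
      | none => '"' :: pvGoA r
      | some la => if pvIsCloser la then '"' :: pvGoA r else '\'' :: pvGoAIn r
    else if c = '\n' then '\\' :: 'n' :: pvGoAIn r
    else if c = '\r' then '\\' :: 'r' :: pvGoAIn r
    else if c = '\t' then '\\' :: 't' :: pvGoAIn r
    else c :: pvGoAIn r
end

def sanitize_json_quotes (json_str : String) : String :=
  String.ofList (pvGoA json_str.toList)

-- ===== PORT B =====
-- B's backward pass: (first non-ws char of l, list of the lookahead AFTER each position)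
def pvLA : List Char → Option Char × List (Option Char)
  | [] => (none, [])
  | c :: r =>
    let p := pvLA r
    ((if pvIsWs c then p.1 else some c), p.1 :: p.2)

-- one step of B's flat loop: state 0 = outside, 1 = inside, 2 = right after a backslash
def pvStepB : List Char × Nat → Char × Option Char → List Char × Nat
  | (out, st), (c, la) =>
  if st = 2 then (out ++ [c], 1)
  else if st = 0 then (out ++ [c], if c = '"' then 1 else 0)
  else if c = '\\' then (out ++ [c], 2)
  else if c = '"' then
    match la with
    | none => (out ++ [c], 0)
    | some x => if pvIsCloser x then (out ++ [c], 0) else (out ++ ['\''], 1)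
  else if c = '\n' then (out ++ ['\\', 'n'], 1)
  else if c = '\r' then (out ++ ['\\', 'r'], 1)
  else if c = '\t' then (out ++ ['\\', 't'], 1)
  else (out ++ [c], 1)

def sanitize_json_quotes_alt (json_str : String) : String :=
  String.ofList ((json_str.toList.zip (pvLA json_str.toList).2).foldl pvStepB ([], 0)).1

-- ===== PRECONDITION & SPEC =====
def Spec_sanitize_json_quotes (json_str : String) (out : String) : Prop := out = sanitize_json_quotes_alt json_str
instance (json_str : String) (out : String) : Decidable (Spec_sanitize_json_quotes json_str out) := by unfold Spec_sanitize_json_quotes; infer_instance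

-- ===== CLAIM (what is proved, stated in full; the proofs are below) =====
def Claim_equal_sanitize_json_quotes : Prop := ∀ (json_str : String), Dom_sanitize_json_quotes json_str → Spec_sanitize_json_quotes json_str (sanitize_json_quotes json_str)

-- ===== LEMMAS AND PROOFS =====

-- A's behaviour when the inner loop has just consumed a backslash
def pvGoEsc : List Char → List Char
  | [] => []
  | d :: r => d :: pvGoAIn r

-- what A produces from the rest of the input in each of B's three states
def pvGoSt (st : Nat) (l : List Char) : List Char :=
  if st = 0 then pvGoA l else if st = 2 then pvGoEsc l else pvGoAIn l

theorem pvLA_fst (l : List Char) : (pvLA l).1 = pvSkipWs l := by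
  induction l with
  | nil => rfl
  | cons c r ih => simp [pvLA, pvSkipWs, ih]

theorem pvGoAIn_backslash (r : List Char) : pvGoAIn ('\\' :: r) = '\\' :: pvGoEsc r := by
  cases r <;> simp [pvGoAIn, pvGoEsc]

theorem pvGoAIn_cons (c : Char) (r : List Char) :
    pvGoAIn (c :: r) =
      (if c = '\\' then
        match r with
        | [] => ['\\']
        | d :: r' => '\\' :: d :: pvGoAIn r'
      else if c = '"' then
        match pvSkipWs r with
        | none => '"' :: pvGoA r
        | some la => if pvIsCloser la then '"' :: pvGoA r else '\'' :: pvGoAIn r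
      else if c = '\n' then '\\' :: 'n' :: pvGoAIn r
      else if c = '\r' then '\\' :: 'r' :: pvGoAIn r
      else if c = '\t' then '\\' :: 't' :: pvGoAIn r
      else c :: pvGoAIn r) := by
  rw [pvGoAIn.eq_def]

-- B's fold over the annotated list continues A's computation, in every state
theorem pvFold_eq (l : List Char) : ∀ (acc : List Char) (st : Nat),
    ((l.zip (pvLA l).2).foldl pvStepB (acc, st)).1 = acc ++ pvGoSt st l := by
  induction l with
  | nil =>
    intro acc st
    simp only [List.zip_nil_left, List.foldl_nil, pvGoSt]
    split_ifs <;> simp [pvGoA, pvGoEsc, pvGoAIn]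
  | cons c r ih =>
    intro acc st
    have hz : (c :: r).zip (pvLA (c :: r)).2 = (c, (pvLA r).1) :: r.zip (pvLA r).2 := by
      simp [pvLA]
    rw [hz, List.foldl_cons]
    by_cases h2 : st = 2
    · subst h2
      simp [pvStepB, ih, pvGoSt, pvGoEsc]
    · by_cases h0 : st = 0
      · subst h0
        by_cases hc : c = '"'
        · subst hc; simp [pvStepB, ih, pvGoSt, pvGoA]
        · simp [pvStepB, ih, pvGoSt, pvGoA, hc]
      · have hst : pvGoSt st (c :: r) = pvGoAIn (c :: r) := by simp [pvGoSt, h0, h2]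
        rw [hst]
        by_cases hb : c = '\\'
        · subst hb
          rw [pvGoAIn_backslash]
          simp [pvStepB, ih, pvGoSt, h0, h2, pvGoEsc]
        · by_cases hq : c = '"'
          · subst hq
            rw [pvGoAIn_cons]
            cases hsw : pvSkipWs r with
            | none =>
              simp [pvStepB, ih, pvGoSt, h0, h2, pvLA_fst, hsw]
            | some x =>
              by_cases hx : pvIsCloser x = true
              · simp [pvStepB, ih, pvGoSt, h0, h2, pvLA_fst, hsw, hx]
              · simp [pvStepB, ih, pvGoSt, h0, h2, pvLA_fst, hsw, hx]
          · rw [pvGoAIn_cons]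
            simp only [if_neg hb, if_neg hq]
            by_cases h1 : c = '\n'
            · subst h1; simp [pvStepB, ih, pvGoSt, h0, h2]
            · by_cases h3 : c = '\r'
              · subst h3; simp [pvStepB, ih, pvGoSt, h0, h2, hb, hq]
              · by_cases h4 : c = '\t'
                · subst h4; simp [pvStepB, ih, pvGoSt, h0, h2, hb, hq]
                · simp [pvStepB, ih, pvGoSt, h0, h2, hb, hq, h1, h3, h4]

-- ===== VERDICT (by name: the statement is the Claim_ definition above) =====
theorem sanitize_json_quotes_spec : Claim_equal_sanitize_json_quotes := by
  intro s _
  unfold Spec_sanitize_json_quotes sanitize_json_quotes sanitize_json_quotes_alt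
  rw [pvFold_eq s.toList [] 0]
  rfl
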